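-- pv_equiv track=rewrite | github.com/alex-ong/UNSWRevueStatics | View/Widgets/GroupPatchWidget.py | finalPatchString
-- ===== SOURCE A (Python) =====
-- from math import ceil
--
-- def finalPatchString(substrings):
--     result = []
--
--     split = ceil(len(substrings) / 2)
--     i = 0
--     while len(substrings) > 0:
--         end = min(2, len(substrings))  # find end index safely
--         lineArray = substrings[0:end]  # get subArray
--         line = '   '.join(lineArray)  # generate...
--         result.append(line)  # and store line
--         substrings = substrings[end:]  # chop front of array
--
--     result = '\n'.join(result)
--     return result
-- ===== SOURCE B (Python) =====
-- def finalPatchString(substrings):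
--     parts = []
--     for i, s in enumerate(substrings):
--         if i > 0:
--             parts.append('   ' if i % 2 == 1 else '\n')
--         parts.append(s)
--     return ''.join(parts)
-- ===== Notes on version B (the rewrite author's own statement) =====
-- stated objective: faster
-- what changed: Replaces A's while-loop that repeatedly slices off two-element chunks, joins each chunk with ' ' and finally joins the lines with '\n', by a single enumerate pass that emits a positional separator ('\n' before even indices, ' ' before odd) and one final ''.join.
import Mathlib
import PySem

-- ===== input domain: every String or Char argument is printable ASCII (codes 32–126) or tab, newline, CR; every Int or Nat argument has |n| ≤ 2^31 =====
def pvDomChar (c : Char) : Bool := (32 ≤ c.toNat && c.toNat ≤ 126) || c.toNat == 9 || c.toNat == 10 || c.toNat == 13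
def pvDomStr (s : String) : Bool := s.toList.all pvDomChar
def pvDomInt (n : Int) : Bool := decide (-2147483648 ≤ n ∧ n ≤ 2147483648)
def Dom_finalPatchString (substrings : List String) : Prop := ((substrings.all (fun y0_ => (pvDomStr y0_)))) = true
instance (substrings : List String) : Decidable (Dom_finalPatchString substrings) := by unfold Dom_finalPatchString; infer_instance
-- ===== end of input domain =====

-- B replaces A's two-element chunking (inner '   '-join per chunk, outer '\n'-join) by one
-- enumerate pass emitting a parity-chosen separator before each element; objective: simpler.

-- ===== PORT A =====
-- A's while loop: take min(2, len) front elements, join with '   ', append the line, chop the front; then '\n'-join.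
def finalPatchString_chunks : List String → List String
  | [] => []
  | [a] => [PySem.Str.join "   " [a]]
  | a :: b :: rest => PySem.Str.join "   " [a, b] :: finalPatchString_chunks rest

def finalPatchString (substrings : List String) : String :=
  PySem.Str.join "\n" (finalPatchString_chunks substrings)

-- ===== PORT B =====
def finalPatchString_alt (substrings : List String) : String :=
  PySem.Str.join ""
    ((PySem.List.enumerate substrings 0).foldl
      (fun parts p =>
        if p.1 > 0 then
          (parts ++ [if PySem.Int.mod p.1 2 == 1 then "   " else "\n"]) ++ [p.2]
        else parts ++ [p.2])
      [])

-- ===== PRECONDITION & SPEC =====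
def Spec_finalPatchString (substrings : List String) (out : String) : Prop := out = finalPatchString_alt substrings
instance (substrings : List String) (out : String) : Decidable (Spec_finalPatchString substrings out) := by unfold Spec_finalPatchString; infer_instance

-- ===== CLAIM (what is proved, stated in full; the proofs are below) =====
def Claim_equal_finalPatchString : Prop := ∀ (substrings : List String), Dom_finalPatchString substrings → Spec_finalPatchString substrings (finalPatchString substrings)

-- ===== LEMMAS AND PROOFS =====

-- B's per-element contribution for indices > 0: the separator, then the element.
def pvSep (p : Int × String) : List String :=
  [if PySem.Int.mod p.1 2 == 1 then "   " else "\n", p.2]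

theorem pv_join_nil_eq_flatten (L : List (List Char)) : PySem.Chars.join [] L = L.flatten := by
  induction L with
  | nil => simp [PySem.Chars.join_nil]
  | cons x r ih =>
    cases r with
    | nil => simp [PySem.Chars.join_singleton]
    | cons y r' => simpa using (PySem.Chars.join_cons_cons [] x y r').trans (by simp [ih])

theorem pv_join_cons_ne (sep x : List Char) (ys : List (List Char)) (h : ys ≠ []) :
    PySem.Chars.join sep (x :: ys) = x ++ sep ++ PySem.Chars.join sep ys := by
  cases ys with
  | nil => exact absurd rfl h
  | cons y r => exact PySem.Chars.join_cons_cons sep x y r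

theorem pv_chunks_ne_nil (a : String) (xs : List String) :
    finalPatchString_chunks (a :: xs) ≠ [] := by
  cases xs <;> simp [finalPatchString_chunks]

theorem pv_mod_odd (k : Nat) : PySem.Int.mod ((2 * (k : Int)) + 1) 2 = 1 := by
  rw [PySem.Int.mod_eq_emod_of_pos (by omega : (0:Int) < 2)]; omega

theorem pv_mod_even (k : Nat) : PySem.Int.mod ((2 * (k : Int)) + 1 + 1) 2 = 0 := by
  rw [PySem.Int.mod_eq_emod_of_pos (by omega : (0:Int) < 2)]; omega

-- The key invariant: the flat parity-separated list starting at odd index 2k+1,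
-- preceded by a pending element a, spells out A's '\n'-joined pair lines.
theorem pv_key : ∀ (xs : List String) (k : Nat) (a : String),
    PySem.Chars.join []
      ((a :: (PySem.List.enumerate xs (2 * (k : Int) + 1)).flatMap pvSep).map String.toList)
      = PySem.Chars.join "\n".toList ((finalPatchString_chunks (a :: xs)).map String.toList)
  | [], k, a => by
    simp [PySem.List.enumerate_nil, finalPatchString_chunks, PySem.Chars.join_singleton,
      PySem.Str.toList_join]
  | [b], k, a => by
    simp only [PySem.List.enumerate_cons, PySem.List.enumerate_nil, finalPatchString_chunks,
      List.flatMap_cons, List.flatMap_nil, pvSep, pv_mod_odd k, List.map, PySem.Str.toList_join]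
    simp [PySem.Chars.join_singleton, PySem.Chars.join_cons_cons]
  | b :: c :: rest, k, a => by
    have ih := pv_key rest (k + 1) c
    have hcast : (2 * ((k + 1 : Nat) : Int) + 1) = 2 * (k : Int) + 1 + 1 + 1 := by push_cast; ring
    rw [hcast] at ih
    simp only [PySem.List.enumerate_cons, finalPatchString_chunks, List.flatMap_cons, pvSep,
      pv_mod_odd k, pv_mod_even k, List.map_cons, List.map_append, PySem.Str.toList_join,
      beq_self_eq_true, if_true] at ih ⊢
    norm_num
    have hrw := pv_join_cons_ne "\n".toList (PySem.Chars.join "   ".toList [a.toList, b.toList])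
      (List.map String.toList (finalPatchString_chunks (c :: rest)))
      (by simpa using pv_chunks_ne_nil c rest)
    rw [hrw, ← ih]
    simp [pv_join_nil_eq_flatten, PySem.Chars.join_cons_cons, PySem.Chars.join_singleton,
      List.append_assoc]

theorem pv_alt_cons (x : String) (xs : List String) :
    finalPatchString_alt (x :: xs) =
      PySem.Str.join "" (x :: (PySem.List.enumerate xs 1).flatMap pvSep) := by
  unfold finalPatchString_alt
  rw [PySem.List.enumerate_cons]
  simp only [List.foldl_cons, gt_iff_lt, lt_irrefl, if_false, List.nil_append]
  rw [PySem.List.foldl_congr_mem (PySem.List.enumerate xs (0 + 1)) _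
      (fun acc p => acc ++ pvSep p) [x]
      (by
        intro acc p hp
        rw [PySem.List.mem_enumerate_iff] at hp
        obtain ⟨j, hj, rfl⟩ := hp
        have hpos : ((0:Int) + 1 + (j : Int)) > 0 := by omega
        rw [if_pos hpos]
        simp [pvSep])]
  rw [PySem.List.foldl_append_eq_flatMap]
  norm_num

theorem pv_toList_inj {s t : String} (h : s.toList = t.toList) : s = t := by
  simpa using congrArg String.ofList h

-- ===== VERDICT (by name: the statement is the Claim_ definition above) =====
theorem finalPatchString_spec : Claim_equal_finalPatchString := by
  intro substrings _
  unfold Spec_finalPatchString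
  cases substrings with
  | nil =>
    apply pv_toList_inj
    simp [finalPatchString, finalPatchString_alt, finalPatchString_chunks,
      PySem.List.enumerate_nil, PySem.Str.toList_join, PySem.Chars.join_nil]
  | cons x xs =>
    apply Eq.symm
    apply pv_toList_inj
    rw [pv_alt_cons, finalPatchString, PySem.Str.toList_join, PySem.Str.toList_join]
    have h := pv_key xs 0 x
    have h1 : (2 * ((0 : Nat) : Int) + 1) = 1 := by norm_num
    rw [h1] at h
    simpa using h
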